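-- pv_equiv track=rewrite | github.com/menna161/API-Wizard | API-Wizard/helpers/remove_repeated.py | remove_repeated
-- ===== SOURCE A (Python) =====
-- def remove_repeated(code_output):
--   result = []
--   for i in range(len(code_output)):
--       keep = True
--       for j in range(len(code_output)):
--           if i != j and code_output[j].startswith(code_output[i][:-1]) :
--               keep = False
--               if len(code_output[j]) > len(code_output[i]):
--                   # If another line starts with this line and is longer,
--                   # skip to the next line in the outer loop.
--                   break
--       if keep:
--           result.append(code_output[i])
--   return result
-- ===== SOURCE B (Python) =====
-- def remove_repeated(code_output):
--     # Sort once; strings sharing a given prefix are contiguous in sorted order,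
--     # so "some OTHER string starts with s[:-1]" reduces to checking the two
--     # sorted neighbours of s.
--     srt = sorted(code_output)
--     n = len(srt)
--     keep = {}
--     for k in range(n):
--         p = srt[k][:-1]
--         ok = not ((k > 0 and srt[k - 1].startswith(p)) or
--                   (k + 1 < n and srt[k + 1].startswith(p)))
--         keep[srt[k]] = ok
--     return [s for s in code_output if keep[s]]
-- ===== Notes on version B (the rewrite author's own statement) =====
-- stated objective: faster
-- what changed: A decides each string with a nested scan over all other strings; B sorts the list once, decides every string by checking only its two sorted neighbours (strings sharing a prefix are contiguous after sorting), records the decisions in a dict and filters the original list.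
import Mathlib
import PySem

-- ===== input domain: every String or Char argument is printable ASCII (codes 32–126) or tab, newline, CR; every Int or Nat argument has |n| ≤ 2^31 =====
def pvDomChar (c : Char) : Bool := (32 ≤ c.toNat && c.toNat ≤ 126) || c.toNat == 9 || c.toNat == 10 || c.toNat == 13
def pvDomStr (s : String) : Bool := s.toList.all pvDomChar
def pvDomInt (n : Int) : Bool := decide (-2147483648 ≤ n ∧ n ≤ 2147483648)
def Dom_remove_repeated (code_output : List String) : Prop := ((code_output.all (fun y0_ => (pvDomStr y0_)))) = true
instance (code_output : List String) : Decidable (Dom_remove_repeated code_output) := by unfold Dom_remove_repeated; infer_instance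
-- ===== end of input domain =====

-- B replaces A's quadratic all-pairs prefix scan by one sort plus a sorted-neighbour check
-- (strings sharing a prefix are contiguous after sorting); same return value on every input.

-- ===== PORT A =====
-- A's inner 'for j in range(len(code_output)):' loop over the enumerated list;
-- `keep` is the loop-carried flag; returning inside the recursion is the `break`.
def pvAInner (i : Int) (p : String) (leni : Int) : List (Int × String) → Bool → Bool
  | [], keep => keep
  | (j, sj) :: rest, keep =>
    if i ≠ j ∧ PySem.Str.startswith sj p = true then
      (if PySem.Str.len sj > leni then false
       else pvAInner i p leni rest false)
    else pvAInner i p leni rest keep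

def remove_repeated (code_output : List String) : List String :=
  (PySem.List.enumerate code_output 0).foldl
    (fun result isi =>
      if pvAInner isi.1 (PySem.Str.slice isi.2 none (some (-1))) (PySem.Str.len isi.2)
           (PySem.List.enumerate code_output 0) true
      then result ++ [isi.2] else result) []

-- ===== PORT B =====
-- one iteration's decision of B's loop: neither sorted neighbour of srt[k] starts with
-- p = srt[k][:-1] (Source B binds p once; it is inlined here, the same value)
def pvBOk (srt : List String) (n : Int) (k : Int) (s : String) : Bool :=
  !((decide (0 < k) &&
      PySem.Str.startswith (PySem.List.pyGetD srt (k - 1) "") (PySem.Str.slice s none (some (-1)))) ||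
    (decide (k + 1 < n) &&
      PySem.Str.startswith (PySem.List.pyGetD srt (k + 1) "") (PySem.Str.slice s none (some (-1)))))

def remove_repeated_alt (code_output : List String) : List String :=
  let srt := PySem.List.sorted code_output (fun x => x)
  let n : Int := srt.length
  let keep := (PySem.List.enumerate srt 0).foldl
      (fun d ks => d.insert ks.2 (pvBOk srt n ks.1 ks.2)) (PySem.Dict.empty)
  code_output.filter (fun s => keep.getD s false)

-- ===== PRECONDITION & SPEC =====
def Spec_remove_repeated (code_output : List String) (out : List String) : Prop := out = remove_repeated_alt code_output
instance (code_output : List String) (out : List String) : Decidable (Spec_remove_repeated code_output out) := by unfold Spec_remove_repeated; infer_instance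

-- ===== CLAIM (what is proved, stated in full; the proofs are below) =====
def Claim_equal_remove_repeated : Prop := ∀ (code_output : List String), Dom_remove_repeated code_output → Spec_remove_repeated code_output (remove_repeated code_output)

-- ===== LEMMAS AND PROOFS =====

-- the common specification: keep s iff exactly one list element (s itself) has s[:-1] as a prefix
def pvQ (lst : List String) (s : String) : Bool :=
  decide (lst.countP (fun x => PySem.Chars.startswith x.toList s.toList.dropLast) = 1)

-- A's inner loop computes 'no other enumerated string starts with p' (the break only exits early)
lemma pvAInner_eq (i : Int) (p : String) (leni : Int) :
    ∀ (l : List (Int × String)) (keep : Bool),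
    pvAInner i p leni l keep
      = (keep && l.all (fun js => !(decide (i ≠ js.1) && PySem.Str.startswith js.2 p))) := by
  intro l
  induction l with
  | nil => intro keep; simp [pvAInner]
  | cons hd tl ih =>
    intro keep
    obtain ⟨j, sj⟩ := hd
    by_cases h : i ≠ j ∧ PySem.Str.startswith sj p = true
    · have hrhs : (!(decide (i ≠ j) && PySem.Str.startswith sj p)) = false := by
        rw [h.2]; simp [h.1]
      simp only [pvAInner, if_pos h, List.all_cons, hrhs, Bool.false_and, Bool.and_false]
      split
      · rfl
      · rw [ih]; simp
    · rw [not_and_or] at h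
      rcases h with h' | h'
      · have hj : i = j := not_not.mp h'
        have hcond : ¬(i ≠ j ∧ PySem.Str.startswith sj p = true) := fun hc => hc.1 hj
        simp only [pvAInner, if_neg hcond, ih, List.all_cons]
        simp [hj]
      · have h2 : PySem.Str.startswith sj p = false := by
          cases hb : PySem.Str.startswith sj p
          · rfl
          · exact absurd hb h'
        have hcond : ¬(i ≠ j ∧ PySem.Str.startswith sj p = true) :=
          fun hc => Bool.false_ne_true (h2 ▸ hc.2)
        simp only [pvAInner, if_neg hcond, ih, List.all_cons]
        rw [h2]; simp

-- folding key ↦ f key inserts: lookup is f when the key occurs, the default otherwise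
lemma pv_getD_fold_insert (f : String → Bool) :
    ∀ (l : List (Int × String)) (d : PySem.Dict String Bool) (x : String) (dflt : Bool),
    ((l.foldl (fun d ks => d.insert ks.2 (f ks.2)) d).getD x dflt)
      = if x ∈ l.map Prod.snd then f x else d.getD x dflt := by
  intro l
  induction l with
  | nil => intro d x dflt; simp
  | cons hd tl ih =>
    intro d x dflt
    simp only [List.foldl_cons, List.map_cons, List.mem_cons]
    rw [ih]
    by_cases hx : x ∈ tl.map Prod.snd
    · simp [hx]
    · by_cases hxe : x = hd.2
      · simp [hxe]
      · simp [hx, hxe, PySem.Dict.getD_insert]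

-- lexicographic interval property: anything between two strings with prefix p has prefix p
lemma pv_lex_between (p : List Char) :
    ∀ (a b c : List Char), a ≤ b → b ≤ c → p <+: a → p <+: c → p <+: b := by
  induction p with
  | nil => intro a b c _ _ _ _; exact List.nil_prefix
  | cons x p' ih =>
    intro a b c hab hbc hpa hpc
    obtain ⟨a', rfl⟩ := hpa
    obtain ⟨c', rfl⟩ := hpc
    cases b with
    | nil =>
      exfalso
      have h2 : ¬ ([] : List Char) < x :: (p' ++ a') := Std.not_lt.mpr hab
      exact h2 (List.nil_lt_cons _ _)
    | cons y b' =>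
      have h1 : ¬ List.Lex (·<·) (y :: b') (x :: (p' ++ a')) := Std.not_lt.mpr hab
      have h2 : ¬ List.Lex (·<·) (x :: (p' ++ c')) (y :: b') := Std.not_lt.mpr hbc
      rw [List.cons_lex_cons_iff] at h1 h2
      push Not at h1 h2
      have hxy : x = y := le_antisymm h1.1 h2.1
      subst hxy
      have hb1 : (p' ++ a' : List Char) ≤ b' := Std.not_lt.mp (h1.2 rfl)
      have hb2 : (b' : List Char) ≤ p' ++ c' := Std.not_lt.mp (h2.2 rfl)
      have := ih (p' ++ a') b' (p' ++ c') hb1 hb2 (List.prefix_append p' a') (List.prefix_append p' c')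
      exact List.cons_prefix_cons.mpr ⟨rfl, this⟩

-- a predicate true at index i holds at no other index iff its count over the list is exactly 1
lemma pv_count_unique_iff (P : String → Bool) :
    ∀ (t : List String) (i : Nat), i < t.length → P (t.getD i "") = true →
    ((∀ j, j < t.length → j ≠ i → P (t.getD j "") = false) ↔ t.countP P = 1) := by
  intro t
  induction t with
  | nil => intro i hi; simp at hi
  | cons a tl ih =>
    intro i hi hPi
    cases i with
    | zero =>
      have hPa : P a = true := by simpa using hPi
      rw [List.countP_cons, if_pos hPa]
      constructor
      · intro h
        have h0 : tl.countP P = 0 := by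
          rw [List.countP_eq_zero]
          intro x hx
          obtain ⟨j, hj, rfl⟩ := List.mem_iff_getElem.mp hx
          have := h (j+1) (by simpa using hj) (by omega)
          rw [List.getD_cons_succ, List.getD_eq_getElem _ _ hj] at this
          simp [this]
        omega
      · intro h j hj hne
        cases j with
        | zero => omega
        | succ j' =>
          rw [List.getD_cons_succ]
          have hj' : j' < tl.length := by simpa using hj
          rw [List.getD_eq_getElem _ _ hj']
          have h0 : tl.countP P = 0 := by omega
          have := List.countP_eq_zero.mp h0 _ (List.getElem_mem hj')
          simpa using this
    | succ i' =>
      have hi' : i' < tl.length := by simpa using hi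
      have hPi' : P (tl.getD i' "") = true := by simpa using hPi
      by_cases hPa : P a = true
      · have hpos : 0 < tl.countP P := by
          rw [List.countP_pos_iff]
          exact ⟨tl[i'], List.getElem_mem hi', by rwa [List.getD_eq_getElem _ _ hi'] at hPi'⟩
        rw [List.countP_cons, if_pos hPa]
        constructor
        · intro h
          have := h 0 (by omega) (by omega)
          rw [List.getD_cons_zero] at this
          simp [hPa] at this
        · intro h; omega
      · have hPa' : P a = false := by cases hb : P a; rfl; exact absurd hb hPa
        have hc : List.countP P (a :: tl) = List.countP P tl := by
          rw [List.countP_cons]; simp [hPa']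
        rw [hc, ← ih i' hi' hPi']
        constructor
        · intro h j hj hne
          have := h (j+1) (by simpa using hj) (by omega)
          rwa [List.getD_cons_succ] at this
        · intro h j hj hne
          cases j with
          | zero => simpa using hPa'
          | succ j' =>
            rw [List.getD_cons_succ]
            exact h j' (by simpa using hj) (by omega)

-- in a sorted list, 'some OTHER element has prefix p' is visible at the two neighbours
lemma pv_neighbor_iff (t : List String) (hs : t.Pairwise (· ≤ ·)) (k : Nat) (hk : k < t.length)
    (p : List Char) (hself : p <+: (t.getD k "").toList) :
    ((∃ m, m < t.length ∧ m ≠ k ∧ p <+: (t.getD m "").toList) ↔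
      ((0 < k ∧ p <+: (t.getD (k - 1) "").toList) ∨
       (k + 1 < t.length ∧ p <+: (t.getD (k + 1) "").toList))) := by
  have mono : ∀ i j : Nat, i ≤ j → j < t.length → t.getD i "" ≤ t.getD j "" := by
    intro i j hij hj
    rcases eq_or_lt_of_le hij with rfl | hlt
    · exact le_refl _
    · rw [List.getD_eq_getElem _ _ (lt_of_le_of_lt hij hj), List.getD_eq_getElem _ _ hj]
      exact List.pairwise_iff_getElem.mp hs i j _ hj hlt
  constructor
  · rintro ⟨m, hm, hne, hpm⟩
    rcases lt_or_gt_of_ne hne with h | h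
    · left
      refine ⟨by omega, ?_⟩
      exact pv_lex_between p _ _ _
        (String.le_iff_toList_le.mp (mono m (k-1) (by omega) (by omega)))
        (String.le_iff_toList_le.mp (mono (k-1) k (by omega) hk)) hpm hself
    · right
      refine ⟨by omega, ?_⟩
      exact pv_lex_between p _ _ _
        (String.le_iff_toList_le.mp (mono k (k+1) (by omega) (by omega)))
        (String.le_iff_toList_le.mp (mono (k+1) m (by omega) hm)) hself hpm
  · rintro (⟨h0, hp⟩ | ⟨h1, hp⟩)
    · exact ⟨k-1, by omega, by omega, hp⟩
    · exact ⟨k+1, by omega, by omega, hp⟩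

-- A's keep-decision for entry (i, lst[i]) is pvQ
lemma pvA_keep_eq (lst : List String) (κ : Nat) (hκ : κ < lst.length) :
    pvAInner (0 + (κ : Int)) (PySem.Str.slice (lst.getD κ "") none (some (-1)))
        (PySem.Str.len (lst.getD κ "")) (PySem.List.enumerate lst 0) true
      = pvQ lst (lst.getD κ "") := by
  have hPκ : PySem.Chars.startswith (lst.getD κ "").toList (lst.getD κ "").toList.dropLast = true :=
    (PySem.Chars.startswith_iff _ _).mpr (List.dropLast_prefix _)
  rw [pvAInner_eq, Bool.true_and, Bool.eq_iff_iff, List.all_eq_true]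
  unfold pvQ
  rw [decide_eq_true_eq,
    ← pv_count_unique_iff (fun x => PySem.Chars.startswith x.toList (lst.getD κ "").toList.dropLast)
      lst κ hκ hPκ]
  constructor
  · intro h j hj hne
    have hmem : ((0 + (j:Int), lst[j]) : Int × String) ∈ PySem.List.enumerate lst 0 :=
      (PySem.List.mem_enumerate_iff lst 0 _).mpr ⟨j, hj, rfl⟩
    have hthis := h _ hmem
    have hne' : (0 + (κ:Int)) ≠ (0 + (j:Int)) := by omega
    rw [decide_eq_true hne', Bool.true_and, Bool.not_eq_true'] at hthis
    rw [List.getD_eq_getElem _ _ hj]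
    simp only [PySem.Str.startswith_eq, PySem.Str.slice_to_neg_one] at hthis
    exact hthis
  · intro h js hmem
    obtain ⟨j, hj, hp⟩ := (PySem.List.mem_enumerate_iff lst 0 js).mp hmem
    subst hp
    by_cases hje : j = κ
    · subst hje
      simp
    · have hthis := h j hj hje
      rw [List.getD_eq_getElem _ _ hj] at hthis
      rw [Bool.not_eq_true', PySem.Str.startswith_eq, PySem.Str.slice_to_neg_one,
        hthis, Bool.and_false]

lemma pvA_filter (lst : List String) :
    remove_repeated lst = lst.filter (pvQ lst) := by
  unfold remove_repeated
  rw [PySem.List.foldl_append_if, List.nil_append]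
  rw [List.filter_congr (q := fun js => (pvQ lst ∘ Prod.snd) js) ?hc]
  case hc =>
    intro x hx
    obtain ⟨κ, hκ, hp⟩ := (PySem.List.mem_enumerate_iff lst 0 x).mp hx
    subst hp
    have := pvA_keep_eq lst κ hκ
    rw [List.getD_eq_getElem _ _ hκ] at this
    exact this
  rw [← List.filter_map, PySem.List.map_snd_enumerate]

-- B's per-iteration decision is pvQ
lemma pvB_ok_eq (lst : List String) (κ : Nat)
    (hκ : κ < (PySem.List.sorted lst (fun x => x)).length) :
    pvBOk (PySem.List.sorted lst (fun x => x))
        ((PySem.List.sorted lst (fun x => x)).length : Int)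
        (0 + (κ : Int)) ((PySem.List.sorted lst (fun x => x)).getD κ "")
      = pvQ lst ((PySem.List.sorted lst (fun x => x)).getD κ "") := by
  set t := PySem.List.sorted lst (fun x => x) with ht
  set s := t.getD κ "" with hsdef
  set p := s.toList.dropLast with hpdef
  have hself : p <+: s.toList := List.dropLast_prefix _
  have hPs : (fun x => PySem.Chars.startswith x.toList p) s = true :=
    (PySem.Chars.startswith_iff _ _).mpr hself
  have hpair : t.Pairwise (· ≤ ·) := PySem.List.sorted_pairwise lst (fun x => x)
  have hneigh := pv_neighbor_iff t hpair κ hκ p hself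
  have hcnt := pv_count_unique_iff (fun x => PySem.Chars.startswith x.toList p) t κ hκ hPs
  have hperm : t.countP (fun x => PySem.Chars.startswith x.toList p)
      = lst.countP (fun x => PySem.Chars.startswith x.toList p) :=
    (PySem.List.sorted_perm lst (fun x => x) false).countP_eq _
  -- the two guarded boolean neighbour tests, propositionally
  have c1 : ((decide (0 < (0 + (κ:Int))) &&
        PySem.Str.startswith (PySem.List.pyGetD t ((0 + (κ:Int)) - 1) "")
          (PySem.Str.slice s none (some (-1)))) = true)
      ↔ (0 < κ ∧ p <+: (t.getD (κ - 1) "").toList) := by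
    rw [Bool.and_eq_true, decide_eq_true_eq]
    constructor
    · rintro ⟨h0, hsw⟩
      have h0' : 0 < κ := by omega
      refine ⟨h0', ?_⟩
      rw [PySem.List.pyGetD_of_nonneg _ _ (by omega)] at hsw
      have he : ((0 + (κ:Int)) - 1).toNat = κ - 1 := by omega
      rw [he] at hsw
      simp only [PySem.Str.startswith_eq, PySem.Str.slice_to_neg_one] at hsw
      exact (PySem.Chars.startswith_iff _ _).mp hsw
    · rintro ⟨h0, hpre⟩
      refine ⟨by omega, ?_⟩
      rw [PySem.List.pyGetD_of_nonneg _ _ (by omega)]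
      have he : ((0 + (κ:Int)) - 1).toNat = κ - 1 := by omega
      rw [he]
      simp only [PySem.Str.startswith_eq, PySem.Str.slice_to_neg_one]
      exact (PySem.Chars.startswith_iff _ _).mpr hpre
  have c2 : ((decide ((0 + (κ:Int)) + 1 < (t.length : Int)) &&
        PySem.Str.startswith (PySem.List.pyGetD t ((0 + (κ:Int)) + 1) "")
          (PySem.Str.slice s none (some (-1)))) = true)
      ↔ (κ + 1 < t.length ∧ p <+: (t.getD (κ + 1) "").toList) := by
    rw [Bool.and_eq_true, decide_eq_true_eq]
    constructor
    · rintro ⟨h0, hsw⟩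
      have h0' : κ + 1 < t.length := by omega
      refine ⟨h0', ?_⟩
      rw [PySem.List.pyGetD_of_nonneg _ _ (by omega)] at hsw
      have he : ((0 + (κ:Int)) + 1).toNat = κ + 1 := by omega
      rw [he] at hsw
      simp only [PySem.Str.startswith_eq, PySem.Str.slice_to_neg_one] at hsw
      exact (PySem.Chars.startswith_iff _ _).mp hsw
    · rintro ⟨h0, hpre⟩
      refine ⟨by omega, ?_⟩
      rw [PySem.List.pyGetD_of_nonneg _ _ (by omega)]
      have he : ((0 + (κ:Int)) + 1).toNat = κ + 1 := by omega
      rw [he]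
      simp only [PySem.Str.startswith_eq, PySem.Str.slice_to_neg_one]
      exact (PySem.Chars.startswith_iff _ _).mpr hpre
  have key : (¬((0 < κ ∧ p <+: (t.getD (κ - 1) "").toList) ∨
        (κ + 1 < t.length ∧ p <+: (t.getD (κ + 1) "").toList)))
      ↔ lst.countP (fun x => PySem.Chars.startswith x.toList p) = 1 := by
    rw [← hneigh, ← hperm, ← hcnt]
    constructor
    · intro hne j hj hjne
      rw [Bool.eq_false_iff]
      intro hsw
      exact hne ⟨j, hj, hjne, (PySem.Chars.startswith_iff _ _).mp hsw⟩
    · rintro hall ⟨m, hm, hmne, hpm⟩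
      have := hall m hm hmne
      rw [Bool.eq_false_iff] at this
      exact this ((PySem.Chars.startswith_iff _ _).mpr hpm)
  unfold pvBOk pvQ
  rw [← hpdef, Bool.eq_iff_iff]
  constructor
  · intro hL
    rw [Bool.not_eq_true', Bool.or_eq_false_iff] at hL
    have h1 : ¬(0 < κ ∧ p <+: (t.getD (κ - 1) "").toList) := fun hp =>
      Bool.false_ne_true (hL.1 ▸ c1.mpr hp)
    have h2 : ¬(κ + 1 < t.length ∧ p <+: (t.getD (κ + 1) "").toList) := fun hp =>
      Bool.false_ne_true (hL.2 ▸ c2.mpr hp)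
    exact decide_eq_true (key.mp (not_or.mpr ⟨h1, h2⟩))
  · intro hR
    have hC := of_decide_eq_true hR
    have hno := key.mpr hC
    rw [not_or] at hno
    have hX := Bool.eq_false_iff.mpr (fun hx => hno.1 (c1.mp hx))
    have hY := Bool.eq_false_iff.mpr (fun hy => hno.2 (c2.mp hy))
    rw [hX, hY]
    rfl

lemma pvB_filter (lst : List String) :
    remove_repeated_alt lst = lst.filter (pvQ lst) := by
  simp only [remove_repeated_alt]
  rw [PySem.List.foldl_congr_mem _ _
    (fun d ks => d.insert ks.2 (pvQ lst ks.2)) PySem.Dict.empty ?hc]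
  case hc =>
    intro acc x hx
    obtain ⟨κ, hκ, hp⟩ :=
      (PySem.List.mem_enumerate_iff (PySem.List.sorted lst (fun x => x)) 0 x).mp hx
    subst hp
    have := pvB_ok_eq lst κ hκ
    rw [List.getD_eq_getElem _ _ hκ] at this
    simp only [this]
  rw [List.filter_congr (q := pvQ lst) ?hf]
  case hf =>
    intro x hx
    rw [pv_getD_fold_insert, PySem.List.map_snd_enumerate]
    rw [if_pos ((PySem.List.mem_sorted lst (fun x => x) false x).mpr hx)]

-- ===== VERDICT (by name: the statement is the Claim_ definition above) =====
theorem remove_repeated_spec : Claim_equal_remove_repeated := by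
  intro lst _
  unfold Spec_remove_repeated
  rw [pvA_filter, pvB_filter]
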